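-- pv_equiv track=rewrite | github.com/sunyifei83/DataPulse | scripts/governance/land_datapulse_blueprint_intake.py | is_allowed_repo_path
-- ===== SOURCE A (Python) =====
-- from typing import Any
--
-- def _to_text(value: Any) -> str:
--     return str(value).strip() if value is not None else ""
--
-- def is_allowed_repo_path(path_text: str, allowed_roots: set[str]) -> bool:
--     candidate = _to_text(path_text)
--     if not candidate:
--         return False
--     for root in allowed_roots:
--         if candidate == root or candidate.startswith(f"{root}/"):
--             return True
--     return False
-- ===== SOURCE B (Python) =====
-- def is_allowed_repo_path(path_text: str, allowed_roots) -> bool: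
--     # Enumerate the candidate's component-boundary prefixes and test each
--     # by membership in a set of the roots, instead of scanning all roots.
--     candidate = path_text.strip()
--     if not candidate:
--         return False
--     roots = set(allowed_roots)
--     if candidate in roots:
--         return True
--     for i, ch in enumerate(candidate):
--         if ch == '/' and candidate[:i] in roots:
--             return True
--     return False
-- ===== Notes on version B (the rewrite author's own statement) =====
-- stated objective: alternative
-- what changed: Instead of scanning every allowed root and doing an equality/startswith test per root, B enumerates the candidate's '/'-boundary prefixes once and tests each by membership in a set of the roots; it trades the per-root scan for per-boundary set lookups.
import Mathlib
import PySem

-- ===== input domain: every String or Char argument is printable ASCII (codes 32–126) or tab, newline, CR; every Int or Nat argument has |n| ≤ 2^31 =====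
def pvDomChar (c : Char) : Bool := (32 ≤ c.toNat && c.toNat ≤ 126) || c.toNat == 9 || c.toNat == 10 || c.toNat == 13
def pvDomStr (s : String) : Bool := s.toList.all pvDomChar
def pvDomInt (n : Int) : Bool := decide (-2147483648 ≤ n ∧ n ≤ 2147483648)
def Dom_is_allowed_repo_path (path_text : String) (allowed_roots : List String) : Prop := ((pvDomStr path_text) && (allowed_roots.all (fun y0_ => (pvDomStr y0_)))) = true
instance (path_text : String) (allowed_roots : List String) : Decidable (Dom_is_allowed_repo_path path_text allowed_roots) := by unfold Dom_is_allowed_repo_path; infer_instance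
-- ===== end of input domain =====

-- B replaces A's per-root equality/startswith scan by one pass over the candidate's
-- '/'-boundary prefixes, each tested by membership in a set of the roots.

-- ===== PORT A =====
-- _to_text(path_text): path_text is a str (never None here), so this is str(path_text).strip()
def is_allowed_repo_path (path_text : String) (allowed_roots : List String) : Bool :=
  let candidate := PySem.Str.strip path_text
  if candidate = "" then false
  else allowed_roots.any (fun root =>
    candidate == root || PySem.Str.startswith candidate (root ++ "/"))

-- ===== PORT B =====
def is_allowed_repo_path_alt (path_text : String) (allowed_roots : List String) : Bool :=
  let candidate := PySem.Str.strip path_text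
  if candidate = "" then false
  else
    let roots : PySem.Set String := PySem.Set.ofList allowed_roots
    if PySem.Set.contains roots candidate then true
    else (PySem.List.enumerate candidate.toList).any (fun p =>
      p.2 == '/' && PySem.Set.contains roots (PySem.Str.slice candidate none (some p.1)))

-- ===== PRECONDITION & SPEC =====
def Spec_is_allowed_repo_path (path_text : String) (allowed_roots : List String) (out : Bool) : Prop := out = is_allowed_repo_path_alt path_text allowed_roots
instance (path_text : String) (allowed_roots : List String) (out : Bool) : Decidable (Spec_is_allowed_repo_path path_text allowed_roots out) := by unfold Spec_is_allowed_repo_path; infer_instance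

-- ===== CLAIM (what is proved, stated in full; the proofs are below) =====
def Claim_equal_is_allowed_repo_path : Prop := ∀ (path_text : String) (allowed_roots : List String), Dom_is_allowed_repo_path path_text allowed_roots → Spec_is_allowed_repo_path path_text allowed_roots (is_allowed_repo_path path_text allowed_roots)

-- ===== LEMMAS AND PROOFS =====

-- A root matches via startswith(root + "/") iff root is a '/'-boundary prefix of the candidate.
theorem boundary_prefix_iff (cs p : List Char) :
    PySem.Chars.startswith cs (p ++ ['/']) = true ↔
    ∃ (k : Nat) (h : k < cs.length), cs[k] = '/' ∧ cs.take k = p := by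
  rw [PySem.Chars.startswith_iff]
  constructor
  · rintro ⟨rest, hrest⟩
    subst hrest
    refine ⟨p.length, by simp, ?_, by simp⟩
    simp
  · rintro ⟨k, hk, hget, htake⟩
    refine ⟨cs.drop (k + 1), ?_⟩
    have h1 : cs.take (k + 1) = p ++ ['/'] := by
      rw [List.take_add_one, htake, List.getElem?_eq_getElem hk, hget]; rfl
    have h2 := List.take_append_drop (k + 1) cs
    rw [h1] at h2
    simpa using h2

theorem main_iff (candidate : String) (allowed_roots : List String) :
    (allowed_roots.any (fun root =>
        candidate == root || PySem.Str.startswith candidate (root ++ "/"))) =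
    (PySem.Set.contains (PySem.Set.ofList allowed_roots) candidate ||
      (PySem.List.enumerate candidate.toList).any (fun p =>
        p.2 == '/' && PySem.Set.contains (PySem.Set.ofList allowed_roots)
          (PySem.Str.slice candidate none (some p.1)))) := by
  rw [Bool.eq_iff_iff]
  simp only [List.any_eq_true, Bool.or_eq_true, beq_iff_eq,
    PySem.Set.contains_iff, PySem.Set.mem_ofList, Bool.and_eq_true,
    PySem.List.mem_enumerate_iff]
  constructor
  · rintro ⟨r, hr, hcase⟩
    rcases hcase with h | h
    · exact Or.inl (h ▸ hr)
    · right
      rw [PySem.Str.startswith_eq] at h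
      have : ((r : String) ++ "/").toList = r.toList ++ ['/'] := by
        simp [String.toList_append]
      rw [this, boundary_prefix_iff] at h
      obtain ⟨k, hk, hget, htake⟩ := h
      refine ⟨((k : Int), candidate.toList[k]), ⟨k, hk, by simp⟩, ?_, ?_⟩
      · simp [hget]
      · have hstr : PySem.Str.slice candidate none (some (k : Int)) = r := by
          apply String.ext_iff.mpr
          simp [PySem.Str.slice, PySem.List.slice_to_natCast, htake]
        exact hstr ▸ hr
  · rintro (h | ⟨p, ⟨k, hk, hp⟩, hslash, hmem⟩)
    · exact ⟨candidate, h, Or.inl rfl⟩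
    · subst hp
      refine ⟨PySem.Str.slice candidate none (some ((0 : Int) + k)), hmem, Or.inr ?_⟩
      rw [PySem.Str.startswith_eq]
      have htl : ((PySem.Str.slice candidate none (some ((0:Int) + k))) ++ "/").toList
          = candidate.toList.take k ++ ['/'] := by
        simp [String.toList_append, PySem.Str.slice, PySem.List.slice_to_natCast]
      rw [htl, boundary_prefix_iff]
      exact ⟨k, hk, by simpa using hslash, rfl⟩

-- ===== VERDICT (by name: the statement is the Claim_ definition above) =====
theorem is_allowed_repo_path_spec : Claim_equal_is_allowed_repo_path := by
  intro path_text allowed_roots _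
  unfold Spec_is_allowed_repo_path is_allowed_repo_path is_allowed_repo_path_alt
  set candidate := PySem.Str.strip path_text with hc
  by_cases h : candidate = ""
  · simp [h]
  · simp only [h, if_false]
    rw [main_iff]
    by_cases hm : PySem.Set.contains (PySem.Set.ofList allowed_roots) candidate <;> simp
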